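-- pv_equiv track=rewrite | github.com/PaddlePaddle/PaddleMIX | paddlemix/datasets/coco_vqa.py | _gen_image_id
-- ===== SOURCE A (Python) =====
-- def _gen_image_id(anno):
--     img_ids = {}
--     n = 0
--     for ann in anno:
--         if "image_id" not in ann.keys():
--             img_id = ann["image"].split("/")[-1].strip(".jpg").split("_")[-1]
--         else:
--             img_id = ann["image_id"]
--         if img_id not in img_ids.keys():
--             img_ids[img_id] = n
--             n += 1
--     return img_ids
-- ===== SOURCE B (Python) =====
-- def _gen_image_id(anno):
--     def extract(ann):
--         if "image_id" in ann:
--             return ann["image_id"]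
--         return ann["image"].split("/")[-1].strip(".jpg").split("_")[-1]
--     ids = [extract(ann) for ann in anno]
--     # an id first occurring at position i gets the number of distinct ids strictly before i
--     return {x: len(set(ids[:i])) for i, x in enumerate(ids) if x not in ids[:i]}
-- ===== Notes on version B (the rewrite author's own statement) =====
-- stated objective: alternative
-- what changed: Replaces A's incremental dict with running counter by a positional closed form: after extracting all ids, a first occurrence at position i is numbered len(set(ids[:i])), the count of distinct earlier ids, built in one dict comprehension over enumerate; trades A's O(n) single pass for O(n^2) prefix scans.
import Mathlib
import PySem

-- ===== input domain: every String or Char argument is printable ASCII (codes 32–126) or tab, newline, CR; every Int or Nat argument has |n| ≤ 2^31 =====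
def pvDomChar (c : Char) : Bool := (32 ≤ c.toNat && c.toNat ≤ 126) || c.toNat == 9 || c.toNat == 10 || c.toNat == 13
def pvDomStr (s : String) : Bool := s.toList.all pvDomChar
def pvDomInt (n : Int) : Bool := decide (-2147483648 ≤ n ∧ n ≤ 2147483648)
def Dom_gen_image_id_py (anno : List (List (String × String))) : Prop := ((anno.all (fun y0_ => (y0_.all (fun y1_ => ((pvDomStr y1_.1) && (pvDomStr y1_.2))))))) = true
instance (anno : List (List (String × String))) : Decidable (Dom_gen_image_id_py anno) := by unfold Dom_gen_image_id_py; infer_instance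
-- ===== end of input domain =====

-- B replaces A's incremental counter dict by a positional closed form (first occurrence at i ↦ number of distinct earlier ids); same values, O(n²) instead of O(n).

-- ===== PORT A =====
-- shared extraction of one image id per annotation (identical expression in A's and B's Python)
def pvExtract (ann : List (String × String)) : String :=
  if (PySem.Dict.mk ann).contains "image_id" = false then
    let s := (PySem.Dict.mk ann).getD "image" ""
    let last := PySem.List.pyGetD ((PySem.Str.split? s "/").getD []) (-1) ""
    let stripped := PySem.Str.stripChars last ".jpg"
    PySem.List.pyGetD ((PySem.Str.split? stripped "_").getD []) (-1) ""
  else (PySem.Dict.mk ann).getD "image_id" ""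

def gen_image_id_py (anno : List (List (String × String))) : List (String × Int) :=
  (anno.foldl
    (fun (st : PySem.Dict String Int × Int) ann =>
      if st.1.contains (pvExtract ann) = false then (st.1.insert (pvExtract ann) st.2, st.2 + 1) else st)
    (PySem.Dict.empty, 0)).1.items

-- ===== PORT B =====
def gen_image_id_py_alt (anno : List (List (String × String))) : List (String × Int) :=
  let ids := anno.map pvExtract
  ((PySem.List.enumerate ids 0).filter
      (fun p => decide (p.2 ∈ PySem.List.slice ids none (some p.1)) = false)).map
    (fun p => (p.2, ((PySem.Set.ofList (PySem.List.slice ids none (some p.1))).length : Int)))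

-- ===== PRECONDITION & SPEC =====
-- Pre_ excludes annotations missing both "image_id" and "image": there A (and B) raise KeyError.
def Pre_gen_image_id_py (anno : List (List (String × String))) : Prop :=
  (anno.all (fun ann => (PySem.Dict.mk ann).contains "image_id" || (PySem.Dict.mk ann).contains "image")) = true
instance (anno : List (List (String × String))) : Decidable (Pre_gen_image_id_py anno) := by
  unfold Pre_gen_image_id_py; infer_instance
def pvWitness_gen_image_id_py : (List (List (String × String))) :=
  [[("image_id", "7")], [("image", "coco/COCO_val2014_000000391895.jpg")]]
def Spec_gen_image_id_py (anno : List (List (String × String))) (out : List (String × Int)) : Prop := out = gen_image_id_py_alt anno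
instance (anno : List (List (String × String))) (out : List (String × Int)) : Decidable (Spec_gen_image_id_py anno out) := by unfold Spec_gen_image_id_py; infer_instance

-- ===== CLAIM (what is proved, stated in full; the proofs are below) =====
def Claim_equal_gen_image_id_py : Prop := ∀ (anno : List (List (String × String))), Dom_gen_image_id_py anno → Pre_gen_image_id_py anno → Spec_gen_image_id_py anno (gen_image_id_py anno)

-- ===== LEMMAS AND PROOFS =====

-- the dict A holds after having seen the distinct ids D, in order
def pvDictOf (D : List String) : PySem.Dict String Int :=
  PySem.Dict.mk ((PySem.List.enumerate D 0).map (fun p => (p.2, p.1)))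

theorem pvDictOf_keys (D : List String) : (pvDictOf D).keys = D := by
  simp [pvDictOf, PySem.Dict.keys, List.map_map, Function.comp_def]

theorem pvFold_invariant (ids : List String) : ∀ (D : List String), D.Nodup →
    ids.foldl
      (fun (st : PySem.Dict String Int × Int) id =>
        if st.1.contains id = false then (st.1.insert id st.2, st.2 + 1) else st)
      (pvDictOf D, (D.length : Int))
    = (pvDictOf (PySem.Set.update D ids), ((PySem.Set.update D ids).length : Int)) := by
  induction ids with
  | nil => exact fun D _ => rfl
  | cons id ids ih =>
    intro D hD
    have hcont : (pvDictOf D).contains id = decide (id ∈ D) := by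
      rw [PySem.Dict.contains_eq_decide_mem_keys, pvDictOf_keys]
    by_cases hmem : id ∈ D
    · have hadd : PySem.Set.add D id = D := by
        simp [PySem.Set.add, PySem.Set.contains, hmem]
      have hupd : PySem.Set.update D (id :: ids) = PySem.Set.update D ids := by
        simp [PySem.Set.update, hadd]
      rw [List.foldl_cons, if_neg (by simp [hcont, hmem]), hupd]
      exact ih D hD
    · have hadd : PySem.Set.add D id = D ++ [id] := by
        simp [PySem.Set.add, PySem.Set.contains, hmem]
      have hupd : PySem.Set.update D (id :: ids) = PySem.Set.update (D ++ [id]) ids := by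
        simp [PySem.Set.update, hadd]
      have hins : (pvDictOf D).insert id (D.length : Int) = pvDictOf (D ++ [id]) := by
        apply PySem.Dict.ext
        rw [PySem.Dict.items_insert_of_not_contains]
        · simp [pvDictOf, PySem.List.enumerate_append]
        · rw [hcont]; simp [hmem]
      have hlen : ((D ++ [id]).length : Int) = (D.length : Int) + 1 := by simp
      rw [List.foldl_cons, if_pos (by simp [hcont, hmem]), hupd, hins, ← hlen]
      exact ih (D ++ [id]) (by simp only [List.nodup_append]; exact ⟨hD, List.nodup_singleton id, by simpa using fun a ha (h : a = id) => hmem (h ▸ ha)⟩)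

-- B's comprehension over any id list equals the numbered dedup list
theorem pvAlt_eq_enumerate_dedup (ids : List String) :
    ((PySem.List.enumerate ids 0).filter
        (fun p => decide (p.2 ∈ PySem.List.slice ids none (some p.1)) = false)).map
      (fun p => (p.2, ((PySem.Set.ofList (PySem.List.slice ids none (some p.1))).length : Int)))
    = (PySem.List.enumerate (PySem.Set.ofList ids) 0).map (fun p => (p.2, p.1)) := by
  induction ids using List.reverseRecOn with
  | nil => rfl
  | append_singleton ys x ih =>
    have hpref : ∀ p ∈ PySem.List.enumerate ys (0 : Int),
        PySem.List.slice (ys ++ [x]) none (some p.1) = PySem.List.slice ys none (some p.1) := by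
      intro p hp
      obtain ⟨k, hk, hpk⟩ := (PySem.List.mem_enumerate_iff ys 0 p).mp hp
      subst hpk
      simp only [zero_add, PySem.List.slice_to_natCast, List.take_append_of_le_length (le_of_lt hk)]
    have hofl : PySem.Set.ofList (ys ++ [x]) = PySem.Set.add (PySem.Set.ofList ys) x := by
      simp [PySem.Set.ofList, List.foldl_append]
    rw [PySem.List.enumerate_append, List.filter_append,
        List.filter_congr (l := PySem.List.enumerate ys 0)
          (q := fun p => decide (decide (p.2 ∈ PySem.List.slice ys none (some p.1)) = false))
          (fun p hp => by simp only [hpref p hp]),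
        List.map_append,
        List.map_congr_left
          (g := fun p => (p.2, ((PySem.Set.ofList (PySem.List.slice ys none (some p.1))).length : Int)))
          (fun p hp => by simp only [hpref p (List.mem_of_mem_filter hp)]), ih]
    have hlast : PySem.List.slice (ys ++ [x]) none (some ((0 : Int) + ys.length)) = ys := by
      simp [PySem.List.slice_to_natCast]
    by_cases hmem : x ∈ ys
    · have : PySem.Set.add (PySem.Set.ofList ys) x = PySem.Set.ofList ys := by
        simp [PySem.Set.add, PySem.Set.contains, PySem.Set.mem_ofList, hmem]
      simp [PySem.List.enumerate, hmem, hofl]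
    · have hadd : PySem.Set.add (PySem.Set.ofList ys) x = PySem.Set.ofList ys ++ [x] := by
        simp [PySem.Set.add, PySem.Set.contains, PySem.Set.mem_ofList, hmem]
      simp [PySem.List.enumerate, hmem, hofl, PySem.List.enumerate_append]

-- ===== VERDICT (by name: the statement is the Claim_ definition above) =====
theorem gen_image_id_py_spec : Claim_equal_gen_image_id_py := by
  intro anno _ _
  unfold Spec_gen_image_id_py gen_image_id_py gen_image_id_py_alt
  rw [show (List.foldl
      (fun (st : PySem.Dict String Int × Int) ann =>
        if st.1.contains (pvExtract ann) = false then (st.1.insert (pvExtract ann) st.2, st.2 + 1) else st)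
      (PySem.Dict.empty, 0) anno)
    = (List.foldl
      (fun (st : PySem.Dict String Int × Int) id =>
        if st.1.contains id = false then (st.1.insert id st.2, st.2 + 1) else st)
      (PySem.Dict.empty, 0) (anno.map pvExtract))
    from (List.foldl_map (f := pvExtract)
      (g := fun (st : PySem.Dict String Int × Int) id =>
        if st.1.contains id = false then (st.1.insert id st.2, st.2 + 1) else st)).symm]
  have h0 : ((PySem.Dict.empty : PySem.Dict String Int), (0 : Int))
      = (pvDictOf [], (([] : List String).length : Int)) := rfl
  rw [h0, pvFold_invariant _ [] List.nodup_nil, pvAlt_eq_enumerate_dedup]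
  simp [pvDictOf, PySem.Set.ofList, PySem.Set.update]
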